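-- pv_equiv track=rewrite | github.com/mariano-aguilar-vela/splice | splice/tests/test_bam_utils.py | _infer_blocks_from_cigar
-- ===== SOURCE A (Python) =====
-- def _infer_blocks_from_cigar(reference_start, cigartuples):
--     """Infer aligned blocks from CIGAR string."""
--     if not cigartuples:
--         return []
--     blocks = []
--     pos = reference_start
--     for op, length in cigartuples:
--         if op in [0, 7, 8]:  # M, =, X
--             blocks.append((pos, pos + length))
--             pos += length
--         elif op in [2, 3]:  # D, N
--             pos += length
--     return blocks
-- ===== SOURCE B (Python) =====
-- def _infer_blocks_from_cigar(reference_start, cigartuples):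
--     """Infer aligned blocks from CIGAR string (two-pass: prefix starts, then comprehension)."""
--     # Pass 1: the reference start coordinate of each op (advance on ref-consuming ops 0,2,3,7,8).
--     starts = []
--     p = reference_start
--     for op, length in cigartuples:
--         starts.append(p)
--         if op in (0, 2, 3, 7, 8):
--             p += length
--     # Pass 2: keep only match-type ops (M/=/X) and emit their blocks.
--     return [(s, s + length) for (op, length), s in zip(cigartuples, starts)
--             if op in (0, 7, 8)]
-- ===== Notes on version B (the rewrite author's own statement) =====
-- stated objective: alternative
-- what changed: Replaces the single loop with mutating pos/blocks state by two passes: a prefix scan recording every op's reference start coordinate, then a zip comprehension that keeps match ops (0,7,8) and emits (start, start+length).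
import Mathlib
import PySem

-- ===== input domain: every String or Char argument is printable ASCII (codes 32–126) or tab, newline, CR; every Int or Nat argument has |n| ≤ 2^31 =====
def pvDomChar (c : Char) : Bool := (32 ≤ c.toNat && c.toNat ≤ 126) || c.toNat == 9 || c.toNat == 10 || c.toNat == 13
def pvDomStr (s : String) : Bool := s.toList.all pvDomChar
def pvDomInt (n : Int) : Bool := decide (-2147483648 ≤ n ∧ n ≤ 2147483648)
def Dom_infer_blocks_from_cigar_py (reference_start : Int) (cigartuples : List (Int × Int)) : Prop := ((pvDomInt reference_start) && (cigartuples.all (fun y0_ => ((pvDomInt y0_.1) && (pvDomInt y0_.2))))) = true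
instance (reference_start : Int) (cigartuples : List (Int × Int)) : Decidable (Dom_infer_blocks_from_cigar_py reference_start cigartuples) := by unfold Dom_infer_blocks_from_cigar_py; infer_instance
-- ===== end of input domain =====

-- B re-implements the block inference as two passes (a prefix scan of reference start
-- coordinates, then a zip comprehension over match ops) instead of A's single
-- state-mutating loop; same cost, alternative decomposition.


-- ===== PORT A =====
-- literal port of A: early return on empty, then one fold carrying (blocks, pos)
def infer_blocks_from_cigar_py (reference_start : Int) (cigartuples : List (Int × Int)) : List (Int × Int) :=
  if cigartuples = [] then []
  else
    (cigartuples.foldl (fun (acc : List (Int × Int) × Int) ol =>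
        let blocks := acc.1
        let pos := acc.2
        let op := ol.1
        let length := ol.2
        if op = 0 ∨ op = 7 ∨ op = 8 then (blocks ++ [(pos, pos + length)], pos + length)
        else if op = 2 ∨ op = 3 then (blocks, pos + length)
        else (blocks, pos))
      ([], reference_start)).1

-- ===== PORT B =====
-- pass 1 of B: the list of reference start coordinates, one per op
def pvStartsB (p : Int) : List (Int × Int) → List Int
  | [] => []
  | ol :: rest =>
      p :: pvStartsB (if ol.1 = 0 ∨ ol.1 = 2 ∨ ol.1 = 3 ∨ ol.1 = 7 ∨ ol.1 = 8 then p + ol.2 else p) rest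

-- pass 2 of B: zip comprehension keeping match ops
def infer_blocks_from_cigar_py_alt (reference_start : Int) (cigartuples : List (Int × Int)) : List (Int × Int) :=
  ((cigartuples.zip (pvStartsB reference_start cigartuples)).filter
      (fun x => decide (x.1.1 = 0 ∨ x.1.1 = 7 ∨ x.1.1 = 8))).map
    (fun x => (x.2, x.2 + x.1.2))

-- ===== PRECONDITION & SPEC =====
def Spec_infer_blocks_from_cigar_py (reference_start : Int) (cigartuples : List (Int × Int)) (out : List (Int × Int)) : Prop := out = infer_blocks_from_cigar_py_alt reference_start cigartuples
instance (reference_start : Int) (cigartuples : List (Int × Int)) (out : List (Int × Int)) : Decidable (Spec_infer_blocks_from_cigar_py reference_start cigartuples out) := by unfold Spec_infer_blocks_from_cigar_py; infer_instance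

-- ===== CLAIM (what is proved, stated in full; the proofs are below) =====
def Claim_equal_infer_blocks_from_cigar_py : Prop := ∀ (reference_start : Int) (cigartuples : List (Int × Int)), Dom_infer_blocks_from_cigar_py reference_start cigartuples → Spec_infer_blocks_from_cigar_py reference_start cigartuples (infer_blocks_from_cigar_py reference_start cigartuples)

-- ===== LEMMAS AND PROOFS =====
theorem pv_loopA_eq (l : List (Int × Int)) : ∀ (blocks : List (Int × Int)) (p : Int),
    (l.foldl (fun (acc : List (Int × Int) × Int) ol =>
        let blocks := acc.1
        let pos := acc.2
        let op := ol.1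
        let length := ol.2
        if op = 0 ∨ op = 7 ∨ op = 8 then (blocks ++ [(pos, pos + length)], pos + length)
        else if op = 2 ∨ op = 3 then (blocks, pos + length)
        else (blocks, pos))
      (blocks, p)).1 = blocks ++ infer_blocks_from_cigar_py_alt p l := by
  induction l with
  | nil => intro blocks p; simp [infer_blocks_from_cigar_py_alt, pvStartsB]
  | cons ol rest ih =>
    intro blocks p
    by_cases h1 : ol.1 = 0 ∨ ol.1 = 7 ∨ ol.1 = 8
    · have h2 : ol.1 = 0 ∨ ol.1 = 2 ∨ ol.1 = 3 ∨ ol.1 = 7 ∨ ol.1 = 8 := by tauto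
      simp [infer_blocks_from_cigar_py_alt, pvStartsB, List.foldl, h1, h2, ih]
    · by_cases h3 : ol.1 = 2 ∨ ol.1 = 3
      · have h2 : ol.1 = 0 ∨ ol.1 = 2 ∨ ol.1 = 3 ∨ ol.1 = 7 ∨ ol.1 = 8 := by tauto
        simp [infer_blocks_from_cigar_py_alt, pvStartsB, List.foldl, h1, h2, h3, ih]
      · have h2 : ¬(ol.1 = 0 ∨ ol.1 = 2 ∨ ol.1 = 3 ∨ ol.1 = 7 ∨ ol.1 = 8) := by tauto
        simp [infer_blocks_from_cigar_py_alt, pvStartsB, List.foldl, h1, h2, h3, ih]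

-- ===== VERDICT (by name: the statement is the Claim_ definition above) =====
theorem infer_blocks_from_cigar_py_spec : Claim_equal_infer_blocks_from_cigar_py := by
  intro rs ct _
  unfold Spec_infer_blocks_from_cigar_py infer_blocks_from_cigar_py
  rcases ct with _ | ⟨ol, rest⟩
  · simp [infer_blocks_from_cigar_py_alt, pvStartsB]
  · simpa using pv_loopA_eq (ol :: rest) [] rs
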